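-- pv_equiv track=rewrite | github.com/AveryKing/diviora-kernel | src/diviora_kernel/verification.py | _match_concept
-- ===== SOURCE A (Python) =====
-- import string
--
-- def _normalize_text(text: str) -> str:
--     table = str.maketrans({ch: " " for ch in string.punctuation if ch != "$"})
--     normalized = text.lower().translate(table)
--     return " ".join(normalized.split())
--
-- def _tokenize_with_positions(text: str) -> list[str]:
--     normalized = _normalize_text(text)
--     return normalized.split()
--
-- def _match_concept(concept: str, doc_tokens: list[str], heading_tokens: set[str], window: int = 10) -> bool:
--     concept_tokens = _tokenize_with_positions(concept)
--     if not concept_tokens: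
--         return True
--
--     if all(token in heading_tokens for token in concept_tokens):
--         return True
--
--     token_positions: dict[str, list[int]] = {}
--     for idx, token in enumerate(doc_tokens):
--         token_positions.setdefault(token, []).append(idx)
--
--     if any(token not in token_positions for token in concept_tokens):
--         return False
--
--     candidate_positions = token_positions[concept_tokens[0]]
--     for anchor in candidate_positions:
--         lower = max(anchor - window, 0)
--         upper = min(anchor + window + 1, len(doc_tokens))
--         local_tokens = set(doc_tokens[lower:upper])
--         if all(token in local_tokens for token in concept_tokens):
--             return True
--
--     return False
-- ===== SOURCE B (Python) =====
-- import string
-- from bisect import bisect_left, bisect_right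
--
--
-- def _normalize_text(text: str) -> str:
--     table = str.maketrans({ch: " " for ch in string.punctuation if ch != "$"})
--     normalized = text.lower().translate(table)
--     return " ".join(normalized.split())
--
--
-- def _tokenize_with_positions(text: str) -> list[str]:
--     normalized = _normalize_text(text)
--     return normalized.split()
--
--
-- def _match_concept(concept: str, doc_tokens: list[str], heading_tokens: set[str], window: int = 10) -> bool:
--     concept_tokens = _tokenize_with_positions(concept)
--     if not concept_tokens:
--         return True
--
--     if all(token in heading_tokens for token in concept_tokens):
--         return True
--
--     # sorted position list per concept token; no global index, no per-anchor slicing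
--     plists = [[i for i, tok in enumerate(doc_tokens) if tok == token]
--               for token in concept_tokens]
--     if any(not p for p in plists):
--         return False
--
--     for anchor in plists[0]:
--         lo, hi = anchor - window, anchor + window
--         if all(bisect_left(p, lo) < bisect_right(p, hi) for p in plists):
--             return True
--     return False
-- ===== Notes on version B (the rewrite author's own statement) =====
-- stated objective: alternative
-- what changed: Replaces the global position dict plus per-anchor slice-and-set construction with per-concept-token sorted position lists queried by bisect range checks per anchor.
-- outside the precondition, e.g. on _match_concept('$x', ['$x', 'x', '$x', 'y'], set(), -2): A returns True, B returns False
import Mathlib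
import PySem

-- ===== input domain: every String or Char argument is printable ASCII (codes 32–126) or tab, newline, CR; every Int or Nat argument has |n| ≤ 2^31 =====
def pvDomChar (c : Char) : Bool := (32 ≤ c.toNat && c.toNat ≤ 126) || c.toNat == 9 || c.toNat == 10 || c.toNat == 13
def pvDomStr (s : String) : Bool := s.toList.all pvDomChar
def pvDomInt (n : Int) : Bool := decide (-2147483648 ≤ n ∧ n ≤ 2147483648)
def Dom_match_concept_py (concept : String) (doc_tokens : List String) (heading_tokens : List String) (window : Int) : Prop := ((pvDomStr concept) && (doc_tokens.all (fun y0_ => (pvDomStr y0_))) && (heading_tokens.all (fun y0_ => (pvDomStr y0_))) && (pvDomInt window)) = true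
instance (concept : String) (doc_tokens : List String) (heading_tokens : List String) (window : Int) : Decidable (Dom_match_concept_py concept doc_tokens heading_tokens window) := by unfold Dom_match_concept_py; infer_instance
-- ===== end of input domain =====

-- B replaces A's global position dict and per-anchor slice-and-set construction by per-concept-token
-- sorted position lists queried with bisect range checks (alternative algorithm of similar cost).

-- ===== PORT A =====
-- string.punctuation with '$' removed (the dict comprehension skips '$')
def pvPunctNoDollar (c : Char) : Bool := "!\"#%&'()*+,-./:;<=>?@[\\]^_`{|}~".toList.contains c

def normalize_text_py (text : String) : String :=
  String.ofList (PySem.Chars.join " ".toList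
    (PySem.Chars.split₀ ((PySem.Str.lower text).toList.map
      (fun c => if pvPunctNoDollar c then ' ' else c))))

def tokenize_with_positions_py (text : String) : List String :=
  PySem.Str.split₀ (normalize_text_py text)

def match_concept_py (concept : String) (doc_tokens : List String) (heading_tokens : List String) (window : Int) : Bool :=
  let concept_tokens := tokenize_with_positions_py concept
  if concept_tokens.isEmpty then true
  else if concept_tokens.all (fun token => heading_tokens.contains token) then true
  else
    let token_positions : PySem.Dict String (List Int) :=
      (PySem.List.enumerate doc_tokens).foldl
        (fun d p => d.insert p.2 ((d.getD p.2 []) ++ [p.1])) PySem.Dict.empty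
    if concept_tokens.any (fun token => !(token_positions.contains token)) then false
    else
      let candidate_positions := token_positions.getD (concept_tokens.headD "") []  -- concept_tokens[0]; nonempty here
      candidate_positions.any (fun anchor =>
        let lower := max (anchor - window) 0
        let upper := min (anchor + window + 1) (doc_tokens.length : Int)
        let local_tokens := PySem.Set.ofList (PySem.List.slice doc_tokens (some lower) (some upper))
        concept_tokens.all (fun token => local_tokens.contains token))

-- ===== PORT B =====
def match_concept_py_alt (concept : String) (doc_tokens : List String) (heading_tokens : List String) (window : Int) : Bool :=
  let concept_tokens := tokenize_with_positions_py concept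
  if concept_tokens.isEmpty then true
  else if concept_tokens.all (fun token => heading_tokens.contains token) then true
  else
    let plists := concept_tokens.map (fun token =>
      (PySem.List.enumerate doc_tokens).filterMap
        (fun p => if p.2 = token then some p.1 else none))
    if plists.any (fun p => p.isEmpty) then false
    else
      (plists.headD []).any (fun anchor =>
        plists.all (fun p =>
          PySem.List.bisectLeft p (anchor - window) < PySem.List.bisectRight p (anchor + window)))

-- ===== PRECONDITION & SPEC =====
-- Pre_ excludes negative window (outside the task's natural domain): there A's slice upper bound
-- anchor+window+1 can be negative and Python's negative-slice wraparound makes A match tokens far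
-- from the anchor, while B naturally finds no position inside an empty range.
def Pre_match_concept_py (concept : String) (doc_tokens : List String) (heading_tokens : List String) (window : Int) : Prop := 0 ≤ window
instance (concept : String) (doc_tokens : List String) (heading_tokens : List String) (window : Int) : Decidable (Pre_match_concept_py concept doc_tokens heading_tokens window) := by unfold Pre_match_concept_py; infer_instance

def pvWitness_match_concept_py : String × List String × List String × Int := ("cat dog", ["a", "cat", "b", "dog"], ["x"], 3)

def Spec_match_concept_py (concept : String) (doc_tokens : List String) (heading_tokens : List String) (window : Int) (out : Bool) : Prop := out = match_concept_py_alt concept doc_tokens heading_tokens window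
instance (concept : String) (doc_tokens : List String) (heading_tokens : List String) (window : Int) (out : Bool) : Decidable (Spec_match_concept_py concept doc_tokens heading_tokens window out) := by unfold Spec_match_concept_py; infer_instance

-- ===== CLAIM (what is proved, stated in full; the proofs are below) =====
def Claim_equal_match_concept_py : Prop := ∀ (concept : String) (doc_tokens : List String) (heading_tokens : List String) (window : Int), Dom_match_concept_py concept doc_tokens heading_tokens window → Pre_match_concept_py concept doc_tokens heading_tokens window → Spec_match_concept_py concept doc_tokens heading_tokens window (match_concept_py concept doc_tokens heading_tokens window)


-- ===== LEMMAS AND PROOFS =====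

-- positions (as Python ints) at which token t occurs in doc, in increasing order
def pvOcc (doc : List String) (t : String) : List Int :=
  (PySem.List.enumerate doc).filterMap (fun p => if p.2 = t then some p.1 else none)

theorem pv_foldl_getD (l : List (Int × String)) (d : PySem.Dict String (List Int)) (t : String) :
    (l.foldl (fun d p => d.insert p.2 ((d.getD p.2 []) ++ [p.1])) d).getD t []
      = d.getD t [] ++ l.filterMap (fun p => if p.2 = t then some p.1 else none) := by
  induction l generalizing d with
  | nil => simp
  | cons p l ih =>
    simp only [List.foldl_cons, List.filterMap_cons]
    rw [ih]
    by_cases h : p.2 = t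
    · simp [h, PySem.Dict.getD_insert]
    · simp [h, PySem.Dict.getD_insert, Ne.symm h]

theorem pv_foldl_contains (l : List (Int × String)) (d : PySem.Dict String (List Int)) (t : String) :
    ((l.foldl (fun d p => d.insert p.2 ((d.getD p.2 []) ++ [p.1])) d).contains t = true)
      ↔ (d.contains t = true ∨ ∃ p ∈ l, p.2 = t) := by
  induction l generalizing d with
  | nil => simp
  | cons p l ih =>
    simp only [List.foldl_cons, List.mem_cons]
    rw [ih]
    simp [PySem.Dict.contains_insert, beq_iff_eq]
    constructor
    · rintro (h | h) <;> tauto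
    · rintro (h | h | ⟨q, hq, h⟩) <;> tauto

theorem pv_contains_occ (doc : List String) (t : String) :
    ((PySem.List.enumerate doc).foldl
        (fun d p => d.insert p.2 ((d.getD p.2 []) ++ [p.1])) PySem.Dict.empty).contains t
      = !(pvOcc doc t).isEmpty := by
  rw [Bool.eq_iff_iff, pv_foldl_contains]
  simp [pvOcc, List.isEmpty_iff, List.filterMap_eq_nil_iff]

theorem pv_mem_occ (doc : List String) (t : String) (x : Int) :
    x ∈ pvOcc doc t ↔ ∃ k : Nat, ∃ h : k < doc.length, doc[k] = t ∧ x = (k : Int) := by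
  simp only [pvOcc, List.mem_filterMap, PySem.List.mem_enumerate_iff]
  constructor
  · rintro ⟨p, ⟨k, hk, rfl⟩, h⟩
    simp only at h
    by_cases he : doc[k] = t
    · simp [he] at h
      exact ⟨k, hk, he, by omega⟩
    · simp [he] at h
  · rintro ⟨k, hk, he, rfl⟩
    exact ⟨(0 + (k : Int), doc[k]), ⟨k, hk, rfl⟩, by simp [he]⟩

theorem pv_occ_sorted (doc : List String) (t : String) :
    (pvOcc doc t).Pairwise (· ≤ ·) := by
  unfold pvOcc
  rw [List.pairwise_filterMap]
  apply (PySem.List.pairwise_lt_enumerate doc 0).imp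
  intro p q h b hb b' hb'
  by_cases h1 : p.2 = t <;> by_cases h2 : q.2 = t <;> simp [h1, h2] at hb hb'
  omega

theorem pv_bisect_range (xs : List Int) (hs : xs.Pairwise (· ≤ ·)) (lo hi : Int) :
    (PySem.List.bisectLeft xs lo < PySem.List.bisectRight xs hi) ↔ ∃ p ∈ xs, lo ≤ p ∧ p ≤ hi := by
  obtain ⟨hbl_le, hbl_lt, hbl_ge⟩ := PySem.List.bisectLeft_spec xs lo hs
  obtain ⟨hbr_le, hbr_hi, hbr_gt⟩ := PySem.List.bisectRight_spec xs hi hs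
  constructor
  · intro h
    have hlen : PySem.List.bisectLeft xs lo < xs.length := lt_of_lt_of_le h hbr_le
    exact ⟨xs[PySem.List.bisectLeft xs lo], List.getElem_mem _,
      hbl_ge _ hlen le_rfl, hbr_hi _ hlen h⟩
  · rintro ⟨p, hp, h1, h2⟩
    obtain ⟨j, hj, hpe⟩ := List.mem_iff_getElem.mp hp
    have h3 : PySem.List.bisectLeft xs lo ≤ j := by
      by_contra hc
      push_neg at hc
      exact absurd (hpe ▸ hbl_lt j hj hc) (not_lt.mpr h1)
    have h4 : j < PySem.List.bisectRight xs hi := by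
      by_contra hc
      push_neg at hc
      exact absurd (hpe ▸ hbr_gt j hj hc) (not_lt.mpr h2)
    omega

theorem pv_mem_drop_take {a : Type} (xs : List a) (n m : Nat) (x : a) :
    x ∈ (xs.drop n).take m ↔ ∃ k : Nat, ∃ h : k < xs.length, n ≤ k ∧ k < n + m ∧ xs[k] = x := by
  rw [List.mem_iff_getElem]
  constructor
  · rintro ⟨i, hi, he⟩
    simp only [List.length_take, List.length_drop] at hi
    refine ⟨n + i, by omega, by omega, by omega, ?_⟩
    rw [List.getElem_take, List.getElem_drop] at he
    exact he
  · rintro ⟨k, hk, h1, h2, he⟩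
    refine ⟨k - n, by simp only [List.length_take, List.length_drop]; omega, ?_⟩
    rw [List.getElem_take, List.getElem_drop]
    have hkn : n + (k - n) = k := by omega
    simp only [hkn]
    exact he

theorem pv_tok_eq (doc : List String) (token : String) (window anchor : Int)
    (hw : 0 ≤ window) (h0 : 0 ≤ anchor) :
    ((PySem.Set.ofList (PySem.List.slice doc (some (max (anchor - window) 0))
          (some (min (anchor + window + 1) (doc.length : Int))))).contains token = true)
      ↔ (PySem.List.bisectLeft (pvOcc doc token) (anchor - window)
            < PySem.List.bisectRight (pvOcc doc token) (anchor + window)) := by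
  rw [PySem.Set.contains_iff, PySem.Set.mem_ofList,
    PySem.List.slice_toNat doc (by omega) (by omega), pv_mem_drop_take,
    pv_bisect_range _ (pv_occ_sorted doc token)]
  have hlo : ((max (anchor - window) 0).toNat : Int) = max (anchor - window) 0 :=
    Int.toNat_of_nonneg (by omega)
  have hhi : ((min (anchor + window + 1) (doc.length : Int)).toNat : Int)
      = min (anchor + window + 1) (doc.length : Int) :=
    Int.toNat_of_nonneg (by omega)
  constructor
  · rintro ⟨k, hk, h1, h2, he⟩
    exact ⟨(k : Int), (pv_mem_occ doc token _).mpr ⟨k, hk, he, rfl⟩, by omega, by omega⟩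
  · rintro ⟨p, hp, h1, h2⟩
    obtain ⟨k, hk, he, rfl⟩ := (pv_mem_occ doc token p).mp hp
    exact ⟨k, hk, by omega, by omega, he⟩

theorem pv_pred_eq (doc : List String) (ts : List String) (window anchor : Int)
    (hw : 0 ≤ window) (h0 : 0 ≤ anchor) :
    (ts.all (fun token =>
        (PySem.Set.ofList (PySem.List.slice doc (some (max (anchor - window) 0))
          (some (min (anchor + window + 1) (doc.length : Int))))).contains token))
      = ts.all (fun token =>
          PySem.List.bisectLeft (pvOcc doc token) (anchor - window)
            < PySem.List.bisectRight (pvOcc doc token) (anchor + window)) := by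
  rw [Bool.eq_iff_iff, List.all_eq_true, List.all_eq_true]
  refine forall_congr' fun token => imp_congr_right fun _ => ?_
  rw [decide_eq_true_iff, pv_tok_eq doc token window anchor hw h0]

-- ===== VERDICT (by name: the statement is the Claim_ definition above) =====
theorem match_concept_py_spec : Claim_equal_match_concept_py := by
  intro concept doc_tokens heading_tokens window _ hpre
  unfold Spec_match_concept_py match_concept_py match_concept_py_alt
  cases hct : tokenize_with_positions_py concept with
  | nil => simp
  | cons t0 rest =>
    simp only [List.isEmpty_cons, Bool.false_eq_true, if_false]
    by_cases hh : ((t0 :: rest).all (fun token => heading_tokens.contains token)) = true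
    · rw [if_pos hh, if_pos hh]
    · rw [if_neg hh, if_neg hh]
      have hguard : ((t0 :: rest).any (fun token =>
          !(((PySem.List.enumerate doc_tokens).foldl
              (fun d p => d.insert p.2 ((d.getD p.2 []) ++ [p.1]))
              PySem.Dict.empty).contains token)))
          = (((t0 :: rest).map (fun token => (PySem.List.enumerate doc_tokens).filterMap
              (fun p => if p.2 = token then some p.1 else none))).any (fun p => p.isEmpty)) := by
        rw [List.any_map]
        apply PySem.List.any_congr_mem
        intro token _
        simp only [Function.comp, pv_contains_occ, Bool.not_not, pvOcc]
      rw [hguard]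
      by_cases hmiss : (((t0 :: rest).map (fun token => (PySem.List.enumerate doc_tokens).filterMap
          (fun p => if p.2 = token then some p.1 else none))).any (fun p => p.isEmpty)) = true
      · rw [if_pos hmiss, if_pos hmiss]
      · rw [if_neg hmiss, if_neg hmiss]
        have hcand : ((PySem.List.enumerate doc_tokens).foldl
            (fun d p => d.insert p.2 ((d.getD p.2 []) ++ [p.1]))
            PySem.Dict.empty).getD ((t0 :: rest).headD "") [] = pvOcc doc_tokens t0 := by
          rw [pv_foldl_getD]
          simp [pvOcc]
        rw [hcand]
        rw [show (((t0 :: rest).map (fun token => (PySem.List.enumerate doc_tokens).filterMap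
            (fun p => if p.2 = token then some p.1 else none))).headD []) = pvOcc doc_tokens t0 by
          rw [List.map_cons, List.headD_cons]; rfl]
        apply PySem.List.any_congr_mem
        intro anchor hanchor
        obtain ⟨k, hk, he, rfl⟩ := (pv_mem_occ doc_tokens t0 anchor).mp hanchor
        rw [List.all_map]
        have hpe := pv_pred_eq doc_tokens (t0 :: rest) window (k : Int) hpre (by omega)
        simpa [Function.comp, pvOcc] using hpe
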